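-- pv_equiv track=rewrite | github.com/Ks-Classic/numbers-ai | scripts/tools/visualization/visualize_rehearsal_features.py | has_horizontal_or_vertical_neighbor
-- ===== SOURCE A (Python) =====
-- def is_adjacent_horizontal_or_vertical(pos1, pos2):
--     """2つの位置が縦横で隣接しているかチェック"""
--     row1, col1 = pos1
--     row2, col2 = pos2
--     row_diff = abs(row1 - row2)
--     col_diff = abs(col1 - col2)
--
--     # 縦または横で隣接 = 行差または列差が1で、もう一方が0
--     return (row_diff == 1 and col_diff == 0) or (row_diff == 0 and col_diff == 1)
--
-- def has_horizontal_or_vertical_neighbor(pos, all_positions):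
--     """指定位置の周囲8マスに縦横の隣接があるかチェック"""
--     row, col = pos
--     neighbors = [
--         (row - 1, col),  # 上
--         (row + 1, col),  # 下
--         (row, col - 1),  # 左
--         (row, col + 1),  # 右
--     ]
--
--     for neighbor in neighbors:
--         if neighbor in all_positions:
--             if is_adjacent_horizontal_or_vertical(pos, neighbor):
--                 return True
--     return False
-- ===== SOURCE B (Python) =====
-- def has_horizontal_or_vertical_neighbor(pos, all_positions):
--     row, col = pos
--     for p in all_positions:
--         r, c = p
--         row_diff = abs(row - r)
--         col_diff = abs(col - c)
--         if (row_diff == 1 and col_diff == 0) or (row_diff == 0 and col_diff == 1):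
--             return True
--     return False
-- ===== Notes on version B (the rewrite author's own statement) =====
-- stated objective: alternative
-- what changed: Instead of building the four orthogonal neighbor tuples and probing each for membership in the collection, B makes a single scan over all_positions and returns True on the first element at Manhattan distance 1 in a single coordinate.
import Mathlib
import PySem

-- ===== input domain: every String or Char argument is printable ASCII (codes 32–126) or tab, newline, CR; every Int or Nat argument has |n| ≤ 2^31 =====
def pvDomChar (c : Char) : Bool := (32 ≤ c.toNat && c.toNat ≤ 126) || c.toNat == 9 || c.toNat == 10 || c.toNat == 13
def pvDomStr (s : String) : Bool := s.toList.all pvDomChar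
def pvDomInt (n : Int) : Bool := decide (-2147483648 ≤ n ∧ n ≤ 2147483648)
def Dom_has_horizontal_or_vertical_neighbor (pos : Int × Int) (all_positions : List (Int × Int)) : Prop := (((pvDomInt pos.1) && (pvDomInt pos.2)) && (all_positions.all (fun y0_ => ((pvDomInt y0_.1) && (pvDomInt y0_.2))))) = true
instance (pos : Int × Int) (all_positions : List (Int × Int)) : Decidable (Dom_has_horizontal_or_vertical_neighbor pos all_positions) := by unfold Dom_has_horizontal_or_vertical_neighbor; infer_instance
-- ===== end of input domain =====

-- B drops A's four-candidate membership probing in favour of one direct scan of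
-- all_positions testing orthogonal adjacency; same cost, different decomposition.

-- ===== PORT A =====
-- helper: is_adjacent_horizontal_or_vertical from A's module
def is_adjacent_horizontal_or_vertical (pos1 pos2 : Int × Int) : Bool :=
  let row_diff := |pos1.1 - pos2.1|
  let col_diff := |pos1.2 - pos2.2|
  (row_diff == 1 && col_diff == 0) || (row_diff == 0 && col_diff == 1)

-- A's 'for neighbor in neighbors' loop with early return
def hvnLoopA (pos : Int × Int) (all_positions : List (Int × Int)) : List (Int × Int) → Bool
  | [] => false
  | n :: rest =>
    if all_positions.contains n then
      if is_adjacent_horizontal_or_vertical pos n then true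
      else hvnLoopA pos all_positions rest
    else hvnLoopA pos all_positions rest

def has_horizontal_or_vertical_neighbor (pos : Int × Int) (all_positions : List (Int × Int)) : Bool :=
  let row := pos.1
  let col := pos.2
  let neighbors := [(row - 1, col), (row + 1, col), (row, col - 1), (row, col + 1)]
  hvnLoopA pos all_positions neighbors

-- ===== PORT B =====
-- B's 'for p in all_positions' loop with early return
def hvnLoopB (row col : Int) : List (Int × Int) → Bool
  | [] => false
  | (r, c) :: rest =>
    let row_diff := |row - r|
    let col_diff := |col - c|
    if (row_diff == 1 && col_diff == 0) || (row_diff == 0 && col_diff == 1) then true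
    else hvnLoopB row col rest

def has_horizontal_or_vertical_neighbor_alt (pos : Int × Int) (all_positions : List (Int × Int)) : Bool :=
  hvnLoopB pos.1 pos.2 all_positions

-- ===== PRECONDITION & SPEC =====
def Spec_has_horizontal_or_vertical_neighbor (pos : Int × Int) (all_positions : List (Int × Int)) (out : Bool) : Prop := out = has_horizontal_or_vertical_neighbor_alt pos all_positions
instance (pos : Int × Int) (all_positions : List (Int × Int)) (out : Bool) : Decidable (Spec_has_horizontal_or_vertical_neighbor pos all_positions out) := by unfold Spec_has_horizontal_or_vertical_neighbor; infer_instance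

-- ===== CLAIM (what is proved, stated in full; the proofs are below) =====
def Claim_equal_has_horizontal_or_vertical_neighbor : Prop := ∀ (pos : Int × Int) (all_positions : List (Int × Int)), Dom_has_horizontal_or_vertical_neighbor pos all_positions → Spec_has_horizontal_or_vertical_neighbor pos all_positions (has_horizontal_or_vertical_neighbor pos all_positions)

-- ===== LEMMAS AND PROOFS =====

lemma hvnLoopB_iff (row col : Int) (l : List (Int × Int)) :
    hvnLoopB row col l = true ↔
      ∃ p ∈ l, (|row - p.1| = 1 ∧ |col - p.2| = 0) ∨ (|row - p.1| = 0 ∧ |col - p.2| = 1) := by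
  induction l with
  | nil => simp [hvnLoopB]
  | cons hd tl ih =>
    obtain ⟨r, c⟩ := hd
    simp only [hvnLoopB, List.mem_cons]
    split_ifs with h <;>
      simp only [Bool.or_eq_true, Bool.and_eq_true, beq_iff_eq] at h
    · constructor
      · intro _; exact ⟨(r, c), Or.inl rfl, h⟩
      · intro _; rfl
    · rw [ih]
      constructor
      · rintro ⟨p, hp, hadj⟩; exact ⟨p, Or.inr hp, hadj⟩
      · rintro ⟨p, hp | hp, hadj⟩
        · exact absurd hadj (by subst hp; exact h)
        · exact ⟨p, hp, hadj⟩

lemma hvnLoopA_step (pos n : Int × Int) (l rest : List (Int × Int))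
    (h : is_adjacent_horizontal_or_vertical pos n = true) :
    hvnLoopA pos l (n :: rest) = (l.contains n || hvnLoopA pos l rest) := by
  simp only [hvnLoopA, h, if_true]
  cases hc : l.contains n <;> simp

lemma adj_up (row col : Int) : is_adjacent_horizontal_or_vertical (row, col) (row - 1, col) = true := by
  simp [is_adjacent_horizontal_or_vertical, show row - (row - 1) = (1:Int) by ring]
lemma adj_down (row col : Int) : is_adjacent_horizontal_or_vertical (row, col) (row + 1, col) = true := by
  simp [is_adjacent_horizontal_or_vertical, show row - (row + 1) = (-1:Int) by ring]
lemma adj_left (row col : Int) : is_adjacent_horizontal_or_vertical (row, col) (row, col - 1) = true := by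
  simp [is_adjacent_horizontal_or_vertical, show col - (col - 1) = (1:Int) by ring]
lemma adj_right (row col : Int) : is_adjacent_horizontal_or_vertical (row, col) (row, col + 1) = true := by
  simp [is_adjacent_horizontal_or_vertical, show col - (col + 1) = (-1:Int) by ring]

lemma hvnA_iff (row col : Int) (l : List (Int × Int)) :
    has_horizontal_or_vertical_neighbor (row, col) l = true ↔
      (row - 1, col) ∈ l ∨ (row + 1, col) ∈ l ∨ (row, col - 1) ∈ l ∨ (row, col + 1) ∈ l := by
  simp only [has_horizontal_or_vertical_neighbor]
  rw [hvnLoopA_step _ _ _ _ (adj_up row col), hvnLoopA_step _ _ _ _ (adj_down row col),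
      hvnLoopA_step _ _ _ _ (adj_left row col), hvnLoopA_step _ _ _ _ (adj_right row col)]
  simp [hvnLoopA]

-- ===== VERDICT (by name: the statement is the Claim_ definition above) =====
theorem has_horizontal_or_vertical_neighbor_spec : Claim_equal_has_horizontal_or_vertical_neighbor := by
  intro pos l _
  obtain ⟨row, col⟩ := pos
  unfold Spec_has_horizontal_or_vertical_neighbor
  rw [Bool.eq_iff_iff]
  show has_horizontal_or_vertical_neighbor (row, col) l = true ↔ hvnLoopB row col l = true
  rw [hvnA_iff, hvnLoopB_iff]
  constructor
  · rintro (h | h | h | h)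
    · exact ⟨_, h, Or.inl ⟨by simp [show row - (row - 1) = (1:Int) by ring], by simp⟩⟩
    · exact ⟨_, h, Or.inl ⟨by simp [show row - (row + 1) = (-1:Int) by ring], by simp⟩⟩
    · exact ⟨_, h, Or.inr ⟨by simp, by simp [show col - (col - 1) = (1:Int) by ring]⟩⟩
    · exact ⟨_, h, Or.inr ⟨by simp, by simp [show col - (col + 1) = (-1:Int) by ring]⟩⟩
  · rintro ⟨⟨r, c⟩, hp, ⟨h1, h2⟩ | ⟨h1, h2⟩⟩
    · rw [abs_eq (by norm_num : (0:Int) ≤ 1)] at h1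
      rw [abs_eq_zero] at h2
      have hc : c = col := by omega
      subst hc
      rcases h1 with h | h
      · have hr : r = row - 1 := by omega
        subst hr; exact Or.inl hp
      · have hr : r = row + 1 := by omega
        subst hr; exact Or.inr (Or.inl hp)
    · rw [abs_eq_zero] at h1
      rw [abs_eq (by norm_num : (0:Int) ≤ 1)] at h2
      have hr : r = row := by omega
      subst hr
      rcases h2 with h | h
      · have hc : c = col - 1 := by omega
        subst hc; exact Or.inr (Or.inr (Or.inl hp))
      · have hc : c = col + 1 := by omega
        subst hc; exact Or.inr (Or.inr (Or.inr hp))
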